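-- pv_equiv track=rewrite | github.com/Daggerred/fineasy-backend | simple_compliance_endpoint_validation.py | determine_compliance_status
-- ===== SOURCE A (Python) =====
-- from typing import Dict, Any, List
--
-- def determine_compliance_status(issues: List[Dict[str, Any]]) -> str:
--     """Determine overall compliance status"""
--     if not issues:
--         return "compliant"
--
--     # Check for critical issues
--     critical_issues = [i for i in issues if i.get('severity') == 'critical']
--     if critical_issues:
--         return "critical_issues"
--
--     # Check for high severity issues
--     high_issues = [i for i in issues if i.get('severity') == 'high']
--     if len(high_issues) >= 3:  # Multiple high severity issues
--         return "critical_issues"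
--     elif high_issues:
--         return "issues_found"
--
--     # Only medium/low issues
--     return "issues_found"
-- ===== SOURCE B (Python) =====
-- def determine_compliance_status(issues):
--     """Determine overall compliance status"""
--     if not issues:
--         return "compliant"
--     highs = 0
--     for i in issues:
--         s = i.get('severity')
--         if s == 'critical':
--             return "critical_issues"
--         if s == 'high':
--             highs += 1
--             if highs == 3:
--                 return "critical_issues"
--     return "issues_found"
-- ===== Notes on version B (the rewrite author's own statement) =====
-- stated objective: alternative
-- what changed: Replaced A's build-two-filtered-lists-then-measure approach by a short-circuiting decision scan that returns immediately at the first critical issue or the third high issue, never materialising or counting any list.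
import Mathlib
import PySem

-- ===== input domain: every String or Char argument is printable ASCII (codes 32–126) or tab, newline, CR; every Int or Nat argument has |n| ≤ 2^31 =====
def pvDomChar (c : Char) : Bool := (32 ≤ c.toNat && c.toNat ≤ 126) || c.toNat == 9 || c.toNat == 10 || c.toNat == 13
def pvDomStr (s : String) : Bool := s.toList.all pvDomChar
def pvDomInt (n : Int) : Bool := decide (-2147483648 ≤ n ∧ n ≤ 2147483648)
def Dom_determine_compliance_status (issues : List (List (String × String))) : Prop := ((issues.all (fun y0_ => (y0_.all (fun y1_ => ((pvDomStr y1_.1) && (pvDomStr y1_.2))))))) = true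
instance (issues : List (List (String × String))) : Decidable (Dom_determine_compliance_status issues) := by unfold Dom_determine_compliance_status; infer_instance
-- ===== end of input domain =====

-- B replaces A's build-filtered-lists-then-measure passes by a short-circuiting scan that
-- returns at the first critical issue or the third high issue (objective: alternative).

-- dict.get('severity'): first-match lookup in the association list
def pvGetSeverity (i : List (String × String)) : Option String :=
  (i.find? (fun p => p.1 == "severity")).map (·.2)

-- ===== PORT A =====
def determine_compliance_status (issues : List (List (String × String))) : String :=
  if issues = [] then "compliant"
  else
    let critical_issues := issues.filter (fun i => pvGetSeverity i == some "critical")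
    if critical_issues ≠ [] then "critical_issues"
    else
      let high_issues := issues.filter (fun i => pvGetSeverity i == some "high")
      if high_issues.length ≥ 3 then "critical_issues"
      else if high_issues ≠ [] then "issues_found"
      else "issues_found"

-- ===== PORT B =====
-- the early-exit loop of Source B: returns as soon as the verdict is decided
def pvScan : List (List (String × String)) → Nat → String
  | [], _ => "issues_found"
  | i :: rest, highs =>
    let s := pvGetSeverity i
    if s = some "critical" then "critical_issues"
    else if s = some "high" then
      if highs + 1 = 3 then "critical_issues" else pvScan rest (highs + 1)
    else pvScan rest highs

def determine_compliance_status_alt (issues : List (List (String × String))) : String :=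
  if issues = [] then "compliant" else pvScan issues 0

-- ===== PRECONDITION & SPEC =====
def Spec_determine_compliance_status (issues : List (List (String × String))) (out : String) : Prop := out = determine_compliance_status_alt issues
instance (issues : List (List (String × String))) (out : String) : Decidable (Spec_determine_compliance_status issues out) := by unfold Spec_determine_compliance_status; infer_instance

-- ===== CLAIM (what is proved, stated in full; the proofs are below) =====
def Claim_equal_determine_compliance_status : Prop := ∀ (issues : List (List (String × String))), Dom_determine_compliance_status issues → Spec_determine_compliance_status issues (determine_compliance_status issues)

-- ===== LEMMAS AND PROOFS =====

-- the early-exit scan, entered with highs < 3, decides exactly "some critical, or 3 or more highs in total"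
theorem pvScan_eq (xs : List (List (String × String))) (h : Nat) (hlt : h < 3) :
    pvScan xs h =
      if (xs.filter (fun i => pvGetSeverity i == some "critical")) ≠ [] ∨
         h + (xs.filter (fun i => pvGetSeverity i == some "high")).length ≥ 3
      then "critical_issues" else "issues_found" := by
  induction xs generalizing h with
  | nil =>
    rw [if_neg (by simp; omega)]
    simp [pvScan]
  | cons x rest ih =>
    by_cases hc : pvGetSeverity x = some "critical"
    · simp [pvScan, hc]
    · have hfc : (x :: rest).filter (fun i => pvGetSeverity i == some "critical")
          = rest.filter (fun i => pvGetSeverity i == some "critical") := by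
        simp [hc]
      by_cases hh : pvGetSeverity x = some "high"
      · have hfh : ((x :: rest).filter (fun i => pvGetSeverity i == some "high")).length
            = (rest.filter (fun i => pvGetSeverity i == some "high")).length + 1 := by
          simp [hh]
        by_cases h3 : h + 1 = 3
        · rw [if_pos (Or.inr (by rw [hfh]; omega))]
          simp [pvScan, hh, h3]
        · have hstep : pvScan (x :: rest) h = pvScan rest (h + 1) := by
            simp [pvScan, hh, h3]
          rw [hstep, ih (h + 1) (by omega), hfc, hfh]
          exact if_congr
            ⟨fun t => t.imp id (fun u => by omega), fun t => t.imp id (fun u => by omega)⟩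
            rfl rfl
      · have hfh : (x :: rest).filter (fun i => pvGetSeverity i == some "high")
            = rest.filter (fun i => pvGetSeverity i == some "high") := by
          simp [hh]
        have hstep : pvScan (x :: rest) h = pvScan rest h := by
          simp [pvScan, hc, hh]
        rw [hstep, ih h hlt, hfc, hfh]

-- ===== VERDICT (by name: the statement is the Claim_ definition above) =====
theorem determine_compliance_status_spec : Claim_equal_determine_compliance_status := by
  intro issues _
  unfold Spec_determine_compliance_status determine_compliance_status determine_compliance_status_alt
  by_cases hnil : issues = []
  · simp [hnil]
  · simp only [hnil, if_false]
    rw [pvScan_eq issues 0 (by omega)]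
    by_cases hc : issues.filter (fun i => pvGetSeverity i == some "critical") = []
    · by_cases hh : (issues.filter (fun i => pvGetSeverity i == some "high")).length ≥ 3
      · simp [hc, hh]
      · simp [hc, hh]
    · simp [hc]
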